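-- pv_equiv track=rewrite | github.com/k22o/books | deaplearning_chiner/ch5.rf_size.py | in_from_out
-- ===== SOURCE A (Python) =====
-- convnet =[[3,1,1], [3,1,1], [2,2,0],
--           [3,1,1], [3,1,1], [2,2,0],
--           [3,1,1], [3,1,1], [3,1,1], [2,2,0],
--           [3,1,1], [3,1,1], [3,1,1], [2,2,0],
--           [3,1,1], [3,1,1], [3,1,1], [2,2,0],
--           [7,1,3], [1,1,0],]
--
-- def in_from_out(layernum=9,net=convnet):
--     if layernum>len(net):
--         layernum = len(net)
--
--     outsize = 1
--     for layer in reversed(range(layernum)):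
--         ksize,stride,pad = net[layer]
--         #ネットワーク内の出力サイズ(outsize*outsize)
--         outsize = ((outsize-1)* stride) + ksize
--     #入力層まで遡って計算した受容野
--     rf_size = outsize
--     return rf_size
-- ===== SOURCE B (Python) =====
-- convnet =[[3,1,1], [3,1,1], [2,2,0],
--           [3,1,1], [3,1,1], [2,2,0],
--           [3,1,1], [3,1,1], [3,1,1], [2,2,0],
--           [3,1,1], [3,1,1], [3,1,1], [2,2,0],
--           [3,1,1], [3,1,1], [3,1,1], [2,2,0],
--           [7,1,3], [1,1,0],]
--
-- def in_from_out(layernum=9, net=convnet):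
--     if layernum > len(net):
--         layernum = len(net)
--     # staged computation: materialise the visited layers, build the list of
--     # cumulative stride products (jumps), then sum the per-layer contributions
--     layers = [net[i] for i in range(layernum)]
--     jumps = [1]
--     for _k, s, _p in layers:
--         jumps.append(jumps[-1] * s)
--     return 1 + sum((k - 1) * j for (k, _s, _p), j in zip(layers, jumps))
-- ===== Notes on version B (the rewrite author's own statement) =====
-- stated objective: alternative
-- what changed: B replaces A's single backward fold outsize=(outsize-1)*stride+ksize over reversed layer indices by a staged forward computation: it materialises the visited layers, builds the list of cumulative stride products (jumps), and returns 1 plus the sum of (ksize-1)*jump over the zipped lists.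
import Mathlib
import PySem

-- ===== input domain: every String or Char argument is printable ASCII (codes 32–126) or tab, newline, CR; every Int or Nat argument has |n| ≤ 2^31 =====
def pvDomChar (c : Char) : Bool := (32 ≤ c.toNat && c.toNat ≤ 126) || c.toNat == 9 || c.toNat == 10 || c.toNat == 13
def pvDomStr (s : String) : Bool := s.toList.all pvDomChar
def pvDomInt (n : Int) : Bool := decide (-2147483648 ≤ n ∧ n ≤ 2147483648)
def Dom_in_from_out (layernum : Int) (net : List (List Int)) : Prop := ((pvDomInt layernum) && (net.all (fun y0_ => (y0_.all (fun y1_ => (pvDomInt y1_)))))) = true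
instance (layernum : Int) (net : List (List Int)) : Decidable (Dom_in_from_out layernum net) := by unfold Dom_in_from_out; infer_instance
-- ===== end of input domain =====

-- B computes the same receptive field by a staged sum over cumulative stride products
-- instead of A's backward fold; return values only, no mutation.

-- ===== PORT A =====
-- A's loop body: ksize,stride,pad = net[layer]; outsize = (outsize-1)*stride + ksize
-- (the '_ => 0' branch is where Python raises ValueError on unpacking; excluded by Pre_)
def pvStepA (net : List (List Int)) (outsize layer : Int) : Int :=
  match (PySem.List.pyGet? net layer).getD [] with
  | [ksize, stride, _pad] => (outsize - 1) * stride + ksize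
  | _ => 0

-- backward pass: for layer in reversed(range(layernum)): outsize = (outsize-1)*stride + ksize
def in_from_out (layernum : Int) (net : List (List Int)) : Int :=
  ((PySem.List.pyRange 0
      (if layernum > (net.length : Int) then (net.length : Int) else layernum) 1).reverse).foldl
    (pvStepA net) 1

-- ===== PORT B =====
-- layers = [net[i] for i in range(layernum)]
def pvLayersB (layernum : Int) (net : List (List Int)) : List (List Int) :=
  (PySem.List.pyRange 0 layernum 1).map (fun i => (PySem.List.pyGet? net i).getD [])

-- '_k, s, _p = row' used by the jumps loop ('_ => 0' is Python's ValueError branch, excluded by Pre_)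
def pvStride (row : List Int) : Int :=
  match row with
  | [_k, s, _p] => s
  | _ => 0

-- jumps = [1]; for _k, s, _p in layers: jumps.append(jumps[-1] * s)
def pvJumps (layers : List (List Int)) : List Int :=
  layers.foldl (fun js row => js ++ [js.getLastD 1 * pvStride row]) [1]

-- one term of the generator: (k - 1) * j for (k, _s, _p), j in zip(layers, jumps)
def pvTerm (rj : List Int × Int) : Int :=
  match rj.1 with
  | [k, _s, _p] => (k - 1) * rj.2
  | _ => 0

-- staged: visited layers, cumulative stride products, then 1 + the zipped sum
def in_from_out_alt (layernum : Int) (net : List (List Int)) : Int :=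
  let n := if layernum > (net.length : Int) then (net.length : Int) else layernum
  let layers := pvLayersB n net
  1 + ((layers.zip (pvJumps layers)).map pvTerm).sum

-- ===== PRECONDITION & SPEC =====
-- Pre_ excludes exactly the inputs where Python raises ValueError: a visited layer row whose
-- length is not 3 cannot be unpacked as 'ksize,stride,pad = net[layer]'.
def Pre_in_from_out (layernum : Int) (net : List (List Int)) : Prop :=
  ∀ row ∈ net.take (min layernum (net.length : Int)).toNat, row.length = 3
instance (layernum : Int) (net : List (List Int)) : Decidable (Pre_in_from_out layernum net) := by
  unfold Pre_in_from_out; infer_instance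

def pvWitness_in_from_out : Int × List (List Int) := (2, [[3,1,1],[2,2,0],[5,1,2]])

def Spec_in_from_out (layernum : Int) (net : List (List Int)) (out : Int) : Prop := out = in_from_out_alt layernum net
instance (layernum : Int) (net : List (List Int)) (out : Int) : Decidable (Spec_in_from_out layernum net out) := by unfold Spec_in_from_out; infer_instance

-- ===== CLAIM (what is proved, stated in full; the proofs are below) =====
def Claim_equal_in_from_out : Prop := ∀ (layernum : Int) (net : List (List Int)), Dom_in_from_out layernum net → Pre_in_from_out layernum net → Spec_in_from_out layernum net (in_from_out layernum net)

-- ===== LEMMAS AND PROOFS =====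

-- the row-level backward step (A's body, read off a row instead of an index)
def pvStepRow (row : List Int) (outsize : Int) : Int :=
  match row with
  | [ksize, stride, _pad] => (outsize - 1) * stride + ksize
  | _ => 0

-- structural form of the jumps list: scanl of stride products
def pvScan : Int → List (List Int) → List Int
  | j, [] => [j]
  | j, r :: t => j :: pvScan (j * pvStride r) t

theorem pvJumps_aux (rows : List (List Int)) :
    ∀ (js : List Int) (j : Int),
      rows.foldl (fun js row => js ++ [js.getLastD 1 * pvStride row]) (js ++ [j])
        = js ++ pvScan j rows := by
  induction rows with
  | nil => intro js j; simp [pvScan]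
  | cons r t ih =>
    intro js j
    simp only [List.foldl_cons, pvScan]
    rw [show (js ++ [j]).getLastD 1 = j by simp]
    rw [show js ++ [j] ++ [j * pvStride r] = (js ++ [j]) ++ [j * pvStride r] by simp]
    exact (ih (js ++ [j]) (j * pvStride r)).trans (by simp)

theorem pvJumps_eq_scan (rows : List (List Int)) : pvJumps rows = pvScan 1 rows := by
  have := pvJumps_aux rows [] 1
  simpa [pvJumps] using this

-- key invariant: the backward fold minus one, scaled by any jump j, is the zipped sum with scan start j
theorem pv_key (rows : List (List Int))
    (h : ∀ row ∈ rows, ∃ k s p, row = [k, s, p]) :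
    ∀ j : Int,
      (rows.foldr pvStepRow 1 - 1) * j
        = ((rows.zip (pvScan j rows)).map pvTerm).sum := by
  induction rows with
  | nil => intro j; simp [pvScan]
  | cons r t ih =>
    intro j
    obtain ⟨k, s, p, hr⟩ := h r (List.mem_cons_self ..)
    have ht := ih (fun y hy => h y (List.mem_cons_of_mem _ hy))
    subst hr
    simp only [List.foldr_cons, pvScan, List.zip_cons_cons, List.map_cons, List.sum_cons]
    rw [show pvStepRow [k, s, p] (t.foldr pvStepRow 1)
          = (t.foldr pvStepRow 1 - 1) * s + k by rfl]
    rw [show pvTerm ([k, s, p], j) = (k - 1) * j by rfl]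
    rw [show pvStride [k, s, p] = s by rfl]
    rw [← ht (j * s)]
    ring

theorem pv_rows_shape (layernum : Int) (net : List (List Int))
    (hpre : Pre_in_from_out layernum net) :
    ∀ row ∈ pvLayersB (if layernum > (net.length : Int) then (net.length : Int) else layernum) net,
      ∃ k s p, row = [k, s, p] := by
  intro row hrow
  obtain ⟨x, hx, hget⟩ := List.mem_map.mp hrow
  rw [PySem.List.mem_pyRange_one] at hx
  obtain ⟨hx0, hxlt⟩ := hx
  have hbnd : x < (net.length : Int) ∧ x < layernum := by
    by_cases h : layernum > (net.length : Int) <;> simp [h] at hxlt <;> omega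
  have hxn : x.toNat < net.length := by omega
  have hg : PySem.List.pyGet? net x = some net[x.toNat] := by
    simp [PySem.List.pyGet?, PySem.List.pyIdx?, hx0, hbnd.1]
  have hxm : x.toNat < (net.take (min layernum (net.length : Int)).toNat).length := by
    simp; omega
  have hmem : net[x.toNat] ∈ net.take (min layernum (net.length : Int)).toNat := by
    have heq : (net.take (min layernum (net.length : Int)).toNat)[x.toNat] = net[x.toNat] :=
      List.getElem_take
    exact heq ▸ List.getElem_mem hxm
  have h3 := hpre _ hmem
  match hr : net[x.toNat] with
  | [k, s, p] => exact ⟨k, s, p, by rw [← hget, hg]; simp [hr]⟩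
  | [] | [_] | [_, _] | _ :: _ :: _ :: _ :: _ => rw [hr] at h3; simp at h3

-- ===== VERDICT (by name: the statement is the Claim_ definition above) =====
theorem in_from_out_spec : Claim_equal_in_from_out := by
  intro layernum net _ hpre
  have hshape := pv_rows_shape layernum net hpre
  unfold Spec_in_from_out in_from_out in_from_out_alt
  generalize (if layernum > (net.length : Int) then (net.length : Int) else layernum) = n at hshape ⊢
  rw [List.foldl_reverse]
  have hA : (PySem.List.pyRange 0 n 1).foldr (fun x acc => pvStepA net acc x) 1
      = (pvLayersB n net).foldr pvStepRow 1 := by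
    rw [pvLayersB, List.foldr_map]
    rfl
  rw [hA]
  have hk := pv_key (pvLayersB n net) hshape 1
  rw [← pvJumps_eq_scan] at hk
  simp only []
  omega
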